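-- pv_equiv track=rewrite | github.com/RP-1106/Data-Structures-Practise | Blind75/ArraysAndHashing/7_Valid-Sudoku.py | find_value_in_d
-- ===== SOURCE A (Python) =====
-- def find_value_in_d(d, num, i, j):
--     box_row = i // 3
--     box_col = j // 3
--
--     for val_i, val_j in d[num]:
--         # Check row or column conflict
--         if val_i == i or val_j == j:
--             return True
--
--         # Check sub-box conflict
--         if (val_i // 3 == box_row) and (val_j // 3 == box_col):
--             return True
--     return False
-- ===== SOURCE B (Python) =====
-- def find_value_in_d(d, num, i, j):
--     cells = d[num]
--     # Stage 1: a column conflict can happen anywhere in the stored positions.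
--     if any(vj == j for _, vj in cells):
--         return True
--     # Stage 2: both a row conflict (vi == i) and a sub-box conflict require the
--     # stored cell to lie in the same 3-row band as i (vi // 3 == i // 3), since
--     # vi == i implies vi // 3 == i // 3.  So filter to that band first; inside
--     # the band, a sub-box conflict degenerates to a column-band match.
--     band = [(vi, vj) for vi, vj in cells if vi // 3 == i // 3]
--     return any(vi == i or vj // 3 == j // 3 for vi, vj in band)
-- ===== Notes on version B (the rewrite author's own statement) =====
-- stated objective: alternative
-- what changed: Restructured the conflict test using the absorption vi==i => vi//3==i//3: B checks column conflicts in one pass, then filters the cells to the same 3-row band and inside the band tests only vi==i or column-band equality, instead of A's single scan testing the full row/col/box disjunction per cell with early return.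
import Mathlib
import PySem

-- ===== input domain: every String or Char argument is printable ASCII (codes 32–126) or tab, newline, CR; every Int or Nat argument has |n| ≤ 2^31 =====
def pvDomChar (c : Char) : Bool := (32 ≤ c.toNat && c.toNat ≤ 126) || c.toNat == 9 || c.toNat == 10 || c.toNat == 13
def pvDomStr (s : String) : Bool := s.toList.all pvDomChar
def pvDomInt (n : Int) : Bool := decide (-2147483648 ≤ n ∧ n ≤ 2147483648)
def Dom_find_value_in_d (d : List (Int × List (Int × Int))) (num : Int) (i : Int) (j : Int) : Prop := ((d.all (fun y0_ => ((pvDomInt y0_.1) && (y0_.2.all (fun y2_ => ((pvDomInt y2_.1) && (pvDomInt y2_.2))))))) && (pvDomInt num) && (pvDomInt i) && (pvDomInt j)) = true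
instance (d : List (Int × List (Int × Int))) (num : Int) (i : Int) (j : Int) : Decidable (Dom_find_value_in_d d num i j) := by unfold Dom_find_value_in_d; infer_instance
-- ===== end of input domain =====

-- B restructures the conflict test: one pass for column conflicts, then a filter to the
-- same 3-row band in which row and sub-box conflicts collapse (vi==i implies vi//3==i//3).
-- Pre_ excludes num not a key of d (Python's d[num] raises KeyError there).


-- ===== PORT A =====
-- the 'for val_i, val_j in d[num]' loop with its two early returns
def fvLoopA (cells : List (Int × Int)) (i j : Int) (box_row box_col : Int) : Bool :=
  match cells with
  | [] => false
  | (vi, vj) :: rest =>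
    if vi == i || vj == j then true
    else if PySem.Int.floordiv vi 3 == box_row && PySem.Int.floordiv vj 3 == box_col then true
    else fvLoopA rest i j box_row box_col

def find_value_in_d (d : List (Int × List (Int × Int))) (num : Int) (i : Int) (j : Int) : Bool :=
  let box_row := PySem.Int.floordiv i 3
  let box_col := PySem.Int.floordiv j 3
  match (PySem.Dict.mk d).get? num with
  | some cells => fvLoopA cells i j box_row box_col
  | none => false  -- KeyError in Python; excluded by Pre_

-- ===== PORT B =====
def find_value_in_d_alt (d : List (Int × List (Int × Int))) (num : Int) (i : Int) (j : Int) : Bool :=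
  match (PySem.Dict.mk d).get? num with
  | none => false  -- KeyError in Python; excluded by Pre_
  | some cells =>
    if cells.any (fun c => c.2 == j) then true
    else
      let band := cells.filter (fun c => PySem.Int.floordiv c.1 3 == PySem.Int.floordiv i 3)
      band.any (fun c => c.1 == i || PySem.Int.floordiv c.2 3 == PySem.Int.floordiv j 3)

-- ===== PRECONDITION & SPEC =====
-- Pre_ excludes exactly the inputs where num is not a key of d: Python's d[num] raises KeyError there.
def Pre_find_value_in_d (d : List (Int × List (Int × Int))) (num : Int) (i : Int) (j : Int) : Prop :=
  num ∈ d.map Prod.fst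
instance (d : List (Int × List (Int × Int))) (num : Int) (i : Int) (j : Int) : Decidable (Pre_find_value_in_d d num i j) := by unfold Pre_find_value_in_d; infer_instance
def pvWitness_find_value_in_d : (List (Int × List (Int × Int))) × Int × Int × Int :=
  ([(5, [(0, 1), (4, 4)])], 5, 0, 4)

def Spec_find_value_in_d (d : List (Int × List (Int × Int))) (num : Int) (i : Int) (j : Int) (out : Bool) : Prop := out = find_value_in_d_alt d num i j
instance (d : List (Int × List (Int × Int))) (num : Int) (i : Int) (j : Int) (out : Bool) : Decidable (Spec_find_value_in_d d num i j out) := by unfold Spec_find_value_in_d; infer_instance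

-- ===== CLAIM (what is proved, stated in full; the proofs are below) =====
def Claim_equal_find_value_in_d : Prop := ∀ (d : List (Int × List (Int × Int))) (num : Int) (i : Int) (j : Int), Dom_find_value_in_d d num i j → Pre_find_value_in_d d num i j → Spec_find_value_in_d d num i j (find_value_in_d d num i j)

-- ===== LEMMAS AND PROOFS =====
lemma fvLoopA_iff (cells : List (Int × Int)) (i j br bc : Int) :
    fvLoopA cells i j br bc = true ↔
      ∃ c ∈ cells, c.1 = i ∨ c.2 = j ∨
        (PySem.Int.floordiv c.1 3 = br ∧ PySem.Int.floordiv c.2 3 = bc) := by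
  induction cells with
  | nil => simp [fvLoopA]
  | cons hd tl ih =>
    obtain ⟨vi, vj⟩ := hd
    rw [fvLoopA]
    split_ifs with h1 h2 <;> simp_all <;> tauto

theorem find_value_in_d_spec : Claim_equal_find_value_in_d := by
  intro d num i j _ _
  unfold Spec_find_value_in_d find_value_in_d find_value_in_d_alt
  cases h : (PySem.Dict.mk d).get? num with
  | none => rfl
  | some cells =>
    simp only []
    rw [Bool.eq_iff_iff, fvLoopA_iff]
    by_cases hc : cells.any (fun c => c.2 == j) = true
    · simp only [hc, if_true, iff_true]
      rw [List.any_eq_true] at hc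
      obtain ⟨c, hm, hcj⟩ := hc
      exact ⟨c, hm, Or.inr (Or.inl (by simpa using hcj))⟩
    · simp only [hc, Bool.false_eq_true, if_false]
      rw [List.any_eq_true]
      constructor
      · rintro ⟨c, hm, hcase⟩
        rcases hcase with h | h | ⟨h1, h2⟩
        · exact ⟨c, List.mem_filter.mpr ⟨hm, by simp [h]⟩, by simp [h]⟩
        · exact absurd (List.any_eq_true.mpr ⟨c, hm, by simp [h]⟩) hc
        · exact ⟨c, List.mem_filter.mpr ⟨hm, by simpa using h1⟩,
            by simp; exact Or.inr (by simpa using h2)⟩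
      · rintro ⟨c, hmf, hcase⟩
        obtain ⟨hm, hband⟩ := List.mem_filter.mp hmf
        refine ⟨c, hm, ?_⟩
        rcases Bool.or_eq_true_iff.mp hcase with h | h
        · exact Or.inl (by simpa using h)
        · exact Or.inr (Or.inr ⟨by simpa using hband, by simpa using h⟩)

-- ===== VERDICT (by name: the statement is the Claim_ definition above) =====
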